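-- pv_equiv track=rewrite | github.com/kiriisomer/console-mahjong-game | src/rule.py | compose_3_patterns
-- ===== SOURCE A (Python) =====
-- def check_pat_count_overflow(pat: str):
--     """检查模式里是不是有牌超过了4张"""
--     from collections import Counter
--
--     stat = Counter(pat)
--     for i in stat.values():
--         if i > 4:
--             return True
--     return False
--
-- def compose_3_patterns(
--     pat1_list: list[str], pat2_list: list[str], pat3_list: list[str]
-- ):
--     """组合三个模式"""
--     pattern = []
--     for i in pat1_list:
--         for j in pat2_list:
--             for k in pat3_list:
--                 result = "".join(sorted((i + j + k)))
--                 if check_pat_count_overflow(result):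
--                     continue
--                 else:
--                     pattern.append(result)
--     return pattern
-- ===== SOURCE B (Python) =====
-- def _no_overflow(s):
--     return all(s.count(c) <= 4 for c in set(s))
--
--
-- def compose_3_patterns(
--     pat1_list: list[str], pat2_list: list[str], pat3_list: list[str]
-- ):
--     """Two-phase: first keep the pat1+pat2 prefixes that do not overflow
--     (overflow is monotone under appending), then combine with pat3."""
--     prefixes = [i + j for i in pat1_list for j in pat2_list if _no_overflow(i + j)]
--     return [
--         "".join(sorted(p + k))
--         for p in prefixes
--         for k in pat3_list
--         if _no_overflow(p + k)
--     ]
-- ===== Notes on version B (the rewrite author's own statement) =====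
-- stated objective: alternative
-- what changed: Replaces A's single triple-nested loop with a two-phase decomposition: first materialize the list of pat1+pat2 prefixes that do not overflow (overflow counts are monotone under appending, so pruned prefixes can never yield a kept result), then combine each surviving prefix with pat3 by filter+map; this can skip whole pat3 scans for overflowing prefixes.
import Mathlib
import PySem

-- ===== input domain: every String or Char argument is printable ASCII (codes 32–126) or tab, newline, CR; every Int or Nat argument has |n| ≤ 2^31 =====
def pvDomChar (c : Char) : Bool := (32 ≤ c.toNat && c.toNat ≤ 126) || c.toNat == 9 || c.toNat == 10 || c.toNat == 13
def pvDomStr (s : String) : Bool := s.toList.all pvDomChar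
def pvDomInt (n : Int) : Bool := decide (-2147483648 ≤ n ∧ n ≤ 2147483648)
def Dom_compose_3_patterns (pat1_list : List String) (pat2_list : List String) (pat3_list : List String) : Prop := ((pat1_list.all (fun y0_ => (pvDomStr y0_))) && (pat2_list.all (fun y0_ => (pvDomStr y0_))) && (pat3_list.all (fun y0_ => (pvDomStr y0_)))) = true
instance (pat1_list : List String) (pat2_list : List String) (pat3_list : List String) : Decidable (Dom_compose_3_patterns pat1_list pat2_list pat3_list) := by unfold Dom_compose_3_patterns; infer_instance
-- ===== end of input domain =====

-- B replaces A's single triple-nested loop by a two-phase decomposition (materialize the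
-- non-overflowing pat1+pat2 prefixes, then combine each with pat3): an alternative structure
-- with the same output.

-- ===== PORT A =====
-- for i in Counter(pat).values(): if i > 4: return True; return False
def check_pat_count_overflow (pat : String) : Bool :=
  (PySem.Dict.counter pat.toList).values.any (fun i => decide (4 < i))

def compose_3_patterns (pat1_list : List String) (pat2_list : List String) (pat3_list : List String) : List String :=
  pat1_list.foldl (fun pattern i =>
    pat2_list.foldl (fun pattern j =>
      pat3_list.foldl (fun pattern k =>
        let result := String.ofList (PySem.List.sorted (i.toList ++ j.toList ++ k.toList) (fun c => c) false)
        if check_pat_count_overflow result then pattern else pattern ++ [result])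
      pattern)
    pattern)
  []

-- ===== PORT B =====
-- all(s.count(c) <= 4 for c in set(s))  (all over a set: order-independent, exact)
def pvNoOverflow (s : List Char) : Bool :=
  (PySem.Set.ofList s).all (fun c => decide (s.count c ≤ 4))

def compose_3_patterns_alt (pat1_list : List String) (pat2_list : List String) (pat3_list : List String) : List String :=
  let prefixes := pat1_list.flatMap (fun i =>
    ((pat2_list.map (fun j => i.toList ++ j.toList)).filter pvNoOverflow))
  prefixes.flatMap (fun p =>
    (pat3_list.filter (fun k => pvNoOverflow (p ++ k.toList))).map
      (fun k => String.ofList (PySem.List.sorted (p ++ k.toList) (fun c => c) false)))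

-- ===== PRECONDITION & SPEC =====
def Spec_compose_3_patterns (pat1_list : List String) (pat2_list : List String) (pat3_list : List String) (out : List String) : Prop := out = compose_3_patterns_alt pat1_list pat2_list pat3_list
instance (pat1_list : List String) (pat2_list : List String) (pat3_list : List String) (out : List String) : Decidable (Spec_compose_3_patterns pat1_list pat2_list pat3_list out) := by unfold Spec_compose_3_patterns; infer_instance

-- ===== CLAIM (what is proved, stated in full; the proofs are below) =====
def Claim_equal_compose_3_patterns : Prop := ∀ (pat1_list : List String) (pat2_list : List String) (pat3_list : List String), Dom_compose_3_patterns pat1_list pat2_list pat3_list → Spec_compose_3_patterns pat1_list pat2_list pat3_list (compose_3_patterns pat1_list pat2_list pat3_list)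

-- ===== LEMMAS AND PROOFS =====

-- A's overflow check on the sorted concatenation is the negation of B's no-overflow check
-- on the unsorted characters (counts are invariant under the sorting permutation).
theorem check_eq_not_noOverflow (l : List Char) :
    check_pat_count_overflow (String.ofList (PySem.List.sorted l (fun c => c) false)) = !pvNoOverflow l := by
  have hperm := PySem.List.sorted_perm l (fun c : Char => c) false
  rw [Bool.eq_iff_iff]
  unfold check_pat_count_overflow pvNoOverflow
  show ((PySem.Dict.counter _).items.map (·.2)).any _ = true ↔ _
  simp only [PySem.Dict.items_counter, List.map_map, List.any_map, List.any_eq_true,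
    Bool.not_eq_true', List.all_eq_false, Function.comp,
    decide_eq_true_eq, not_le, PySem.Set.mem_ofList, String.toList_ofList]
  constructor
  · rintro ⟨c, hc, h4⟩
    exact ⟨c, hperm.mem_iff.mp hc, by exact_mod_cast (hperm.count_eq c ▸ h4)⟩
  · rintro ⟨c, hc, h4⟩
    exact ⟨c, hperm.mem_iff.mpr hc, by exact_mod_cast (hperm.count_eq c ▸ h4)⟩

-- overflow is monotone under appending: a clean concatenation has a clean prefix
theorem noOverflow_of_append (p k : List Char) (h : pvNoOverflow (p ++ k) = true) :
    pvNoOverflow p = true := by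
  simp only [pvNoOverflow, List.all_eq_true, PySem.Set.mem_ofList, decide_eq_true_eq] at h ⊢
  intro c hc
  have := h c (by simp [hc])
  simp only [List.count_append] at this
  omega

-- 'if overflow: continue else append' is filter-then-map (branch-swapped PySem.List.foldl_append_if)
theorem pvFoldl_skip_if {α β : Type} (c : β → Bool) (g : α → β) (l : List α) (acc : List β) :
    l.foldl (fun acc x => if c (g x) then acc else acc ++ [g x]) acc
      = acc ++ (l.filter (fun x => !c (g x))).map g := by
  rw [← PySem.List.foldl_append_if (fun x => !c (g x)) g l acc]
  congr 1
  funext acc x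
  cases h : c (g x) <;> simp [h]

theorem pvFlatMap_filter {α β : Type} (q : α → Bool) (g : α → List β) (l : List α) :
    (l.filter q).flatMap g = l.flatMap (fun x => if q x then g x else []) := by
  induction l with
  | nil => rfl
  | cons a t ih =>
    simp only [List.filter_cons, List.flatMap_cons]
    split <;> simp [*]

theorem ports_eq (p1 p2 p3 : List String) :
    compose_3_patterns p1 p2 p3 = compose_3_patterns_alt p1 p2 p3 := by
  unfold compose_3_patterns compose_3_patterns_alt
  have hinner : ∀ (q : List Char) (acc : List String),
      p3.foldl (fun pattern k =>
          if check_pat_count_overflow (String.ofList (PySem.List.sorted (q ++ k.toList) (fun c => c) false))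
          then pattern
          else pattern ++ [String.ofList (PySem.List.sorted (q ++ k.toList) (fun c => c) false)]) acc
        = acc ++ (p3.filter (fun k => pvNoOverflow (q ++ k.toList))).map
            (fun k => String.ofList (PySem.List.sorted (q ++ k.toList) (fun c => c) false)) := by
    intro q acc
    rw [pvFoldl_skip_if check_pat_count_overflow
        (fun k : String => String.ofList (PySem.List.sorted (q ++ k.toList) (fun c => c) false))]
    congr 1
    congr 1
    apply List.filter_congr
    intro k _
    rw [check_eq_not_noOverflow, Bool.not_not]
  simp only [hinner, PySem.List.foldl_append_eq_flatMap, List.nil_append,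
    List.filter_map, List.flatMap_assoc, pvFlatMap_filter, List.flatMap_map]
  apply List.flatMap_congr
  intro i _
  apply List.flatMap_congr
  intro j _
  simp only [Function.comp]
  by_cases h : pvNoOverflow (i.toList ++ j.toList) = true
  · rw [if_pos h]
  · rw [if_neg h, List.map_eq_nil_iff, List.filter_eq_nil_iff]
    intro k _ hk
    exact h (noOverflow_of_append _ _ (by simpa using hk))

-- ===== VERDICT (by name: the statement is the Claim_ definition above) =====
theorem compose_3_patterns_spec : Claim_equal_compose_3_patterns := by
  intro p1 p2 p3 _
  unfold Spec_compose_3_patterns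
  exact ports_eq p1 p2 p3
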